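-- pv_equiv track=rewrite | github.com/LukaSveigl/ULFRI-undergrad-coursework | year1/semester-1/programming-1 (P1)/Najdaljši Kaladont/temp.py | generate_connections
-- ===== SOURCE A (Python) =====
-- def generate_connections(wds):
--     in_c = [0] * len(wds)
--     out_c = [0] * len(wds)
--
--     count = 0
--     for wd in wds:
--         for w in wds:
--             if wd != w:
--                 if wd[0] == w[-1]:
--                     in_c[count] += 1
--                 if wd[-1] == w[0]:
--                     out_c[count] += 1
--         count += 1
--     return in_c, out_c
-- ===== SOURCE B (Python) =====
-- def generate_connections(wds):
--     def tally(items):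
--         d = {}
--         for x in items:
--             d[x] = d.get(x, 0) + 1
--         return d
--     first = tally(w[:1] for w in wds)
--     last = tally(w[-1:] for w in wds)
--     mult = tally(wds)
--     in_c = []
--     out_c = []
--     for w in wds:
--         h, t = w[:1], w[-1:]
--         excl = mult[w] if h == t else 0
--         in_c.append(last.get(h, 0) - excl)
--         out_c.append(first.get(t, 0) - excl)
--     return in_c, out_c
-- ===== Notes on version B (the rewrite author's own statement) =====
-- stated objective: faster
-- what changed: Replaces the all-pairs double loop with one tallying pass (frequency dicts of first-char and last-char one-character slices plus whole-word multiplicities) and one lookup pass, subtracting the word's own multiplicity when its first and last letters coincide to account for the value-inequality exclusion.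
import Mathlib
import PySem

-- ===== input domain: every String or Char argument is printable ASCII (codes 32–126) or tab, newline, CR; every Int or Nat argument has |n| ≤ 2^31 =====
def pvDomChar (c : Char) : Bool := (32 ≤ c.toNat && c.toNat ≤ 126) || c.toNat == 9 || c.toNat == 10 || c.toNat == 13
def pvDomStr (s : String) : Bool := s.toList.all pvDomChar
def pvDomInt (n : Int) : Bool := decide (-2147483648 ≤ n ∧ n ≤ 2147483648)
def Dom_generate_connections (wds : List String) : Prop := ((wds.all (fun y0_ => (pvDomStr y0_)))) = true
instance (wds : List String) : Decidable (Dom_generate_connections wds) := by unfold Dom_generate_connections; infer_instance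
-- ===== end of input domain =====

-- B replaces A's all-pairs double loop by one tallying pass (slice-key/word frequency dicts) and one lookup pass; objective: faster (asymptotic).


-- ===== PORT A =====
-- one iteration of A's inner loop over w (for a fixed outer word wd); wd[0]/wd[-1] via pyGet?,
-- total with a default that is never consulted under Pre_ (the inner if-body runs only when wd ≠ w,
-- and Pre_ admits only lists where such a pair has both words nonempty)
def gcA_step (wd : String) (acc : Int × Int) (w : String) : Int × Int :=
  if wd ≠ w then
    let acc1 := if (PySem.Str.pyGet? wd 0).getD ' ' = (PySem.Str.pyGet? w (-1)).getD ' '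
                then (acc.1 + 1, acc.2) else acc
    if (PySem.Str.pyGet? wd (-1)).getD ' ' = (PySem.Str.pyGet? w 0).getD ' '
    then (acc1.1, acc1.2 + 1) else acc1
  else acc

def generate_connections (wds : List String) : List Int × List Int :=
  let rows := wds.map (fun wd => wds.foldl (gcA_step wd) (0, 0))
  (rows.map Prod.fst, rows.map Prod.snd)

-- ===== PORT B =====
-- Source B's tally helper: d[x] = d.get(x, 0) + 1 over the items
def pvTally {α : Type} [BEq α] (xs : List α) : PySem.Dict α Int :=
  xs.foldl (fun d x => d.insert x (d.getD x 0 + 1)) PySem.Dict.empty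

-- Source B's slice keys w[:1] and w[-1:]
def pvFirstS (w : String) : String := PySem.Str.slice w none (some 1)
def pvLastS (w : String) : String := PySem.Str.slice w (some (-1)) none

def generate_connections_alt (wds : List String) : List Int × List Int :=
  let first := pvTally (wds.map pvFirstS)
  let last := pvTally (wds.map pvLastS)
  let mult := pvTally wds
  let rows := wds.map (fun w =>
    let excl := if pvFirstS w = pvLastS w then mult.getD w 0 else 0
    (last.getD (pvFirstS w) 0 - excl, first.getD (pvLastS w) 0 - excl))
  (rows.map Prod.fst, rows.map Prod.snd)

-- ===== PRECONDITION & SPEC =====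
-- Pre_ excludes exactly the lists on which Python A raises IndexError: those mixing an empty word
-- with a distinct word (there wd[0]/w[-1] is evaluated on the empty string). Lists of only empty
-- words, where A returns zeros, are admitted and matched.
def Pre_generate_connections (wds : List String) : Prop :=
  (∀ w ∈ wds, w ≠ "") ∨ (∀ w ∈ wds, w = "")
instance (wds : List String) : Decidable (Pre_generate_connections wds) := by unfold Pre_generate_connections; infer_instance
def pvWitness_generate_connections : List String := ["ab", "ba", "ab"]

def Spec_generate_connections (wds : List String) (out : List Int × List Int) : Prop := out = generate_connections_alt wds
instance (wds : List String) (out : List Int × List Int) : Decidable (Spec_generate_connections wds out) := by unfold Spec_generate_connections; infer_instance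

-- ===== CLAIM (what is proved, stated in full; the proofs are below) =====
def Claim_equal_generate_connections : Prop := ∀ (wds : List String), Dom_generate_connections wds → Pre_generate_connections wds → Spec_generate_connections wds (generate_connections wds)

-- ===== LEMMAS AND PROOFS =====

-- A's char extractions wd[0], wd[-1] (with the port's unused default)
def pvFirstC (w : String) : Char := (PySem.Str.pyGet? w 0).getD ' '
def pvLastC (w : String) : Char := (PySem.Str.pyGet? w (-1)).getD ' '

theorem pvFirstC_eq (w : String) : (PySem.Str.pyGet? w 0).getD ' ' = pvFirstC w := rfl
theorem pvLastC_eq (w : String) : (PySem.Str.pyGet? w (-1)).getD ' ' = pvLastC w := rfl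

-- A's inner loop counts, for fixed wd, the words w ≠ wd whose last (resp. first) char matches
theorem gcA_foldl_count (wd : String) (l : List String) (a b : Int) :
    l.foldl (gcA_step wd) (a, b)
      = (a + (l.countP (fun w => decide (wd ≠ w) && decide (pvFirstC wd = pvLastC w)) : Int),
         b + (l.countP (fun w => decide (wd ≠ w) && decide (pvLastC wd = pvFirstC w)) : Int)) := by
  induction l generalizing a b with
  | nil => simp
  | cons h t ih =>
      simp only [List.foldl_cons, List.countP_cons, gcA_step, pvFirstC_eq, pvLastC_eq]
      by_cases h1 : wd = h <;>
        by_cases h2 : pvFirstC wd = pvLastC h <;>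
        by_cases h3 : pvLastC wd = pvFirstC h <;>
        (try simp only [h1, h2, h3] at ih) <;>
        simp [h1, h2, h3, ih, Prod.ext_iff] <;> omega

-- for a nonempty word, the one-char slices are the singleton strings of A's chars
theorem pvFirstS_toList (s : String) (h : s.toList ≠ []) : (pvFirstS s).toList = [pvFirstC s] := by
  cases hl : s.toList with
  | nil => exact absurd hl h
  | cons c t =>
      simp [pvFirstS, pvFirstC, PySem.Str.toList_slice, PySem.Chars.slice_eq_listSlice,
            PySem.List.slice_to _ (by norm_num : (0:Int) ≤ 1), hl]

theorem pvLastS_toList (s : String) (h : s.toList ≠ []) : (pvLastS s).toList = [pvLastC s] := by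
  simp only [pvLastS, pvLastC, PySem.Str.toList_slice, PySem.Chars.slice_eq_listSlice,
             PySem.List.slice_from_neg_one]
  rw [List.drop_length_sub_one h]
  have hpos : 0 < s.toList.length := List.length_pos_of_ne_nil h
  simp only [PySem.Str.pyGet?, PySem.Chars.pyGet?_eq_listPyGet?, PySem.List.pyGet?,
             PySem.List.pyIdx?]
  have hle : -(s.toList.length : Int) ≤ -1 := by omega
  have h1 : s.toList.length - (-(-1 : Int)).toNat = s.toList.length - 1 := by norm_num
  rw [if_neg (by norm_num : ¬ ((0 : Int) ≤ -1)), if_pos hle, h1]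
  simp only [Option.bind_some]
  rw [List.getElem?_eq_getElem (by omega)]
  simp [List.getLast_eq_getElem]

theorem toList_ne_nil (s : String) (h : s ≠ "") : s.toList ≠ [] := by
  intro hn
  exact h (String.toList_inj.mp (by simpa using hn))

-- under 'both empty or both nonempty', A's char test and B's slice-key test agree
theorem key_iff (s t : String) (h : s = "" ↔ t = "") :
    (pvFirstC s = pvLastC t ↔ pvFirstS s = pvLastS t) := by
  by_cases hs : s = ""
  · have ht : t = "" := h.mp hs
    subst hs; subst ht; decide
  · have ht : t ≠ "" := fun e => hs (h.mpr e)
    rw [← String.toList_inj, pvFirstS_toList s (toList_ne_nil s hs),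
        pvLastS_toList t (toList_ne_nil t ht)]
    simp

theorem key_iff' (s t : String) (h : s = "" ↔ t = "") :
    (pvLastC s = pvFirstC t ↔ pvLastS s = pvFirstS t) := by
  by_cases hs : s = ""
  · have ht : t = "" := h.mp hs
    subst hs; subst ht; decide
  · have ht : t ≠ "" := fun e => hs (h.mpr e)
    rw [← String.toList_inj, pvLastS_toList s (toList_ne_nil s hs),
        pvFirstS_toList t (toList_ne_nil t ht)]
    simp

-- splitting a match-count at the equality w = wd
theorem pv_split {α : Type} [DecidableEq α] (f g : String → α) (wd : String) (l : List String) :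
    l.countP (fun w => decide (wd ≠ w) && decide (g wd = f w))
      + (if g wd = f wd then l.count wd else 0)
      = l.countP (fun w => decide (g wd = f w)) := by
  induction l with
  | nil => simp
  | cons h t ih =>
      simp only [List.countP_cons, List.count_cons]
      by_cases h1 : wd = h <;>
        by_cases h2 : g wd = f h <;>
        (try simp only [h1, h2] at ih) <;>
        simp [h1, h2, Ne.symm] at ih ⊢ <;>
        (try split_ifs at ih ⊢) <;> omega

theorem pvTally_getD {α : Type} [BEq α] [LawfulBEq α] (xs : List α) (v : α) :
    (pvTally xs).getD v 0 = (xs.count v : Int) := by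
  unfold pvTally
  rw [PySem.Dict.getD_foldl_insert_add_one]
  simp

theorem pv_count_map {α : Type} [DecidableEq α] (f : String → α) (c : α) (l : List String) :
    (l.map f).count c = l.countP (fun w => decide (c = f w)) := by
  induction l with
  | nil => simp
  | cons h t ih =>
      by_cases hc : f h = c
      · simp [ih, hc]
      · simp [ih, hc, Ne.symm hc]

theorem pv_row_eq (wd : String) (wds : List String)
    (h1 : ∀ w ∈ wds, (pvFirstC wd = pvLastC w ↔ pvFirstS wd = pvLastS w))
    (h2 : ∀ w ∈ wds, (pvLastC wd = pvFirstC w ↔ pvLastS wd = pvFirstS w)) :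
    wds.foldl (gcA_step wd) (0, 0)
      = ((pvTally (wds.map pvLastS)).getD (pvFirstS wd) 0 -
          (if pvFirstS wd = pvLastS wd then (pvTally wds).getD wd 0 else 0),
         (pvTally (wds.map pvFirstS)).getD (pvLastS wd) 0 -
          (if pvFirstS wd = pvLastS wd then (pvTally wds).getD wd 0 else 0)) := by
  rw [gcA_foldl_count]
  have e1 : wds.countP (fun w => decide (wd ≠ w) && decide (pvFirstC wd = pvLastC w))
      = wds.countP (fun w => decide (wd ≠ w) && decide (pvFirstS wd = pvLastS w)) :=
    List.countP_congr (fun w hw => by simp [h1 w hw])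
  have e2 : wds.countP (fun w => decide (wd ≠ w) && decide (pvLastC wd = pvFirstC w))
      = wds.countP (fun w => decide (wd ≠ w) && decide (pvLastS wd = pvFirstS w)) :=
    List.countP_congr (fun w hw => by simp [h2 w hw])
  rw [e1, e2]
  have hin := pv_split pvLastS pvFirstS wd wds
  have hout := pv_split pvFirstS pvLastS wd wds
  rw [pvTally_getD, pvTally_getD, pvTally_getD, pv_count_map, pv_count_map]
  refine Prod.ext ?_ ?_ <;> simp only [] <;> by_cases hfl : pvFirstS wd = pvLastS wd
  · rw [if_pos hfl] at hin ⊢; omega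
  · rw [if_neg hfl] at hin ⊢; omega
  · have hfl' : pvLastS wd = pvFirstS wd := hfl.symm
    rw [if_pos hfl'] at hout; rw [if_pos hfl]; omega
  · have hfl' : ¬ (pvLastS wd = pvFirstS wd) := fun h => hfl h.symm
    rw [if_neg hfl'] at hout; rw [if_neg hfl]; omega

-- ===== VERDICT (by name: the statement is the Claim_ definition above) =====
theorem generate_connections_spec : Claim_equal_generate_connections := by
  intro wds _ pre
  have hemp : ∀ s ∈ wds, ∀ t ∈ wds, (s = "" ↔ t = "") := by
    rcases pre with h | h
    · intro s hs t ht
      exact ⟨fun e => absurd e (h s hs), fun e => absurd e (h t ht)⟩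
    · intro s hs t ht
      exact ⟨fun _ => h t ht, fun _ => h s hs⟩
  show _ = generate_connections_alt wds
  simp only [generate_connections, generate_connections_alt]
  rw [List.map_congr_left (fun wd hwd =>
    pv_row_eq wd wds
      (fun w hw => key_iff wd w (hemp wd hwd w hw))
      (fun w hw => key_iff' wd w (hemp wd hwd w hw)))]
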